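-- pv_equiv track=rewrite | github.com/LeviTK/CheckMissingChapters | src/toc.py | find_nearest_existing_href
-- ===== SOURCE A (Python) =====
-- def find_nearest_existing_href(missing_num, chapter_map, all_chapters):
--     sorted_chapters = sorted(all_chapters)
--
--     for c in sorted_chapters:
--         if c > missing_num and c in chapter_map:
--             return chapter_map[c]
--
--     for c in reversed(sorted_chapters):
--         if c < missing_num and c in chapter_map:
--             return chapter_map[c]
--
--     if chapter_map:
--         return list(chapter_map.values())[0]
--
--     return "#"
-- ===== SOURCE B (Python) =====
-- def find_nearest_existing_href(missing_num, chapter_map, all_chapters):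
--     above = None  # smallest existing chapter number > missing_num
--     below = None  # largest existing chapter number < missing_num
--     for c in all_chapters:
--         if c in chapter_map:
--             if c > missing_num and (above is None or c < above):
--                 above = c
--             elif c < missing_num and (below is None or below < c):
--                 below = c
--     if above is not None:
--         return chapter_map[above]
--     if below is not None:
--         return chapter_map[below]
--     if chapter_map:
--         return next(iter(chapter_map.values()))
--     return "#"
-- ===== Notes on version B (the rewrite author's own statement) =====
-- stated objective: alternative
-- what changed: Replaces sort + two directional scans with one unsorted pass that tracks the minimum existing chapter above and the maximum existing chapter below missing_num.
import Mathlib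
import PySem

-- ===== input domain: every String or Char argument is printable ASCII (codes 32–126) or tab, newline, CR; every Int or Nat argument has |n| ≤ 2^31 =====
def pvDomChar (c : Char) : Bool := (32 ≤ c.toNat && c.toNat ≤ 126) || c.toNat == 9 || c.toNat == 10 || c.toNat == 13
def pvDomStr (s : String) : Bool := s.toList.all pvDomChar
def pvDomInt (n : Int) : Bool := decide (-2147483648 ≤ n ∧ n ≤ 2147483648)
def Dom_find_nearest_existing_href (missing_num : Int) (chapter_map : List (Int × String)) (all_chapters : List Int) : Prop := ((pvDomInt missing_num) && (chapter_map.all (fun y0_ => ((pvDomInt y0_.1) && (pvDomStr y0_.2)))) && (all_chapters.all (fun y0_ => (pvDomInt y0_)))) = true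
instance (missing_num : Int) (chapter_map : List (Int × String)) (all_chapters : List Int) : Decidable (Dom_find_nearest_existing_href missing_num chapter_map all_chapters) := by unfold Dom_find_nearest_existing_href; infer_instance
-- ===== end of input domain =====

-- B replaces A's sort + two directional scans by one unsorted pass keeping the
-- min existing chapter above and the max existing chapter below missing_num.

-- ===== PORT A =====
-- first loop of A: first c (in the given order) with c > missing_num and c in the map
def faAbove (m : Int) (d : PySem.Dict Int String) : List Int → Option String
  | [] => none
  | c :: t => if m < c ∧ (d.get? c).isSome then d.get? c else faAbove m d t

-- second loop of A: first c (in the given order) with c < missing_num and c in the map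
def faBelow (m : Int) (d : PySem.Dict Int String) : List Int → Option String
  | [] => none
  | c :: t => if c < m ∧ (d.get? c).isSome then d.get? c else faBelow m d t

def find_nearest_existing_href (missing_num : Int) (chapter_map : List (Int × String)) (all_chapters : List Int) : String :=
  let d := PySem.Dict.ofList chapter_map
  let sorted_chapters := PySem.List.sorted all_chapters (fun x => x) false
  match faAbove missing_num d sorted_chapters with
  | some v => v
  | none =>
    match faBelow missing_num d sorted_chapters.reverse with
    | some v => v
    | none =>
      match d.values with
      | v :: _ => v
      | [] => "#"

-- ===== PORT B =====
-- one step of B's single pass, updating (above, below)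
def fbStep (m : Int) (d : PySem.Dict Int String) (ab : Option Int × Option Int) (c : Int) : Option Int × Option Int :=
  if (d.get? c).isSome then
    if decide (m < c) && (ab.1.all (fun a => decide (c < a))) then (some c, ab.2)
    else if decide (c < m) && (ab.2.all (fun b => decide (b < c))) then (ab.1, some c)
    else ab
  else ab

def find_nearest_existing_href_alt (missing_num : Int) (chapter_map : List (Int × String)) (all_chapters : List Int) : String :=
  let d := PySem.Dict.ofList chapter_map
  let ab := all_chapters.foldl (fbStep missing_num d) (none, none)
  match ab.1 with
  | some a => (d.get? a).getD ""
  | none =>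
    match ab.2 with
    | some b => (d.get? b).getD ""
    | none =>
      match d.values with
      | v :: _ => v
      | [] => "#"

-- ===== PRECONDITION & SPEC =====
def Spec_find_nearest_existing_href (missing_num : Int) (chapter_map : List (Int × String)) (all_chapters : List Int) (out : String) : Prop := out = find_nearest_existing_href_alt missing_num chapter_map all_chapters
instance (missing_num : Int) (chapter_map : List (Int × String)) (all_chapters : List Int) (out : String) : Decidable (Spec_find_nearest_existing_href missing_num chapter_map all_chapters out) := by unfold Spec_find_nearest_existing_href; infer_instance

-- ===== CLAIM (what is proved, stated in full; the proofs are below) =====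
def Claim_equal_find_nearest_existing_href : Prop := ∀ (missing_num : Int) (chapter_map : List (Int × String)) (all_chapters : List Int), Dom_find_nearest_existing_href missing_num chapter_map all_chapters → Spec_find_nearest_existing_href missing_num chapter_map all_chapters (find_nearest_existing_href missing_num chapter_map all_chapters)

-- ===== LEMMAS AND PROOFS =====

-- candidate predicates: existing chapter above / below missing_num
def pvP (m : Int) (d : PySem.Dict Int String) (c : Int) : Bool := decide (m < c) && (d.get? c).isSome
def pvQ (m : Int) (d : PySem.Dict Int String) (c : Int) : Bool := decide (c < m) && (d.get? c).isSome

-- running min / max with an optional start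
def pvMinStep (o : Option Int) (c : Int) : Option Int :=
  match o with | none => some c | some x => if c < x then some c else some x
def pvMaxStep (o : Option Int) (c : Int) : Option Int :=
  match o with | none => some c | some x => if x < c then some c else some x
def pvMin (o : Option Int) (l : List Int) : Option Int := l.foldl pvMinStep o
def pvMax (o : Option Int) (l : List Int) : Option Int := l.foldl pvMaxStep o

theorem fb_fold (m : Int) (d : PySem.Dict Int String) (l : List Int) :
    ∀ a b : Option Int,
      l.foldl (fbStep m d) (a, b) =
        (pvMin a (l.filter (pvP m d)), pvMax b (l.filter (pvQ m d))) := by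
  induction l with
  | nil => intro a b; simp [pvMin, pvMax]
  | cons c t ih =>
    intro a b
    by_cases hs : (d.get? c).isSome
    · by_cases h1 : m < c
      · have hq : ¬ c < m := by omega
        have hP : pvP m d c = true := by simp [pvP, h1, hs]
        have hQ : pvQ m d c = false := by simp [pvQ, hq]
        cases a with
        | none =>
          simp [List.foldl_cons, fbStep, hs, h1, hP, hQ, ih, pvMin, pvMinStep]
        | some x =>
          by_cases h2 : c < x
          · simp [List.foldl_cons, fbStep, hs, h1, h2, hq, hP, hQ, ih, pvMin, pvMinStep, pvMaxStep]
          · simp [List.foldl_cons, fbStep, hs, h1, h2, hq, hP, hQ, ih, pvMin, pvMinStep, pvMaxStep]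
      · by_cases hq : c < m
        · have hP : pvP m d c = false := by simp [pvP, h1]
          have hQ : pvQ m d c = true := by simp [pvQ, hq, hs]
          cases b with
          | none =>
            simp [List.foldl_cons, fbStep, hs, h1, hq, hP, hQ, ih, pvMax, pvMaxStep]
          | some x =>
            by_cases h2 : x < c
            · simp [List.foldl_cons, fbStep, hs, h1, hq, h2, hP, hQ, ih, pvMax, pvMinStep, pvMaxStep]
            · simp [List.foldl_cons, fbStep, hs, h1, hq, h2, hP, hQ, ih, pvMax, pvMinStep, pvMaxStep]
        · have hP : pvP m d c = false := by simp [pvP, h1]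
          have hQ : pvQ m d c = false := by simp [pvQ, hq]
          simp [List.foldl_cons, fbStep, hs, h1, hq, hP, hQ, ih]
    · have hP : pvP m d c = false := by simp [pvP, hs]
      have hQ : pvQ m d c = false := by simp [pvQ, hs]
      simp [List.foldl_cons, fbStep, hs, hP, hQ, ih]

theorem pvMin_mem (l : List Int) : ∀ o x, pvMin o l = some x → o = some x ∨ x ∈ l := by
  induction l with
  | nil => intro o x h; exact Or.inl h
  | cons c t ih =>
    intro o x h
    rcases ih (pvMinStep o c) x h with h' | h'
    · cases o with
      | none =>
        simp only [pvMinStep, Option.some.injEq] at h'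
        right; simp [h']
      | some y =>
        simp only [pvMinStep] at h'
        split at h'
        · right; simp only [Option.some.injEq] at h'; simp [h']
        · left; exact h'
    · right; exact List.mem_cons_of_mem _ h'

theorem pvMax_mem (l : List Int) : ∀ o x, pvMax o l = some x → o = some x ∨ x ∈ l := by
  induction l with
  | nil => intro o x h; exact Or.inl h
  | cons c t ih =>
    intro o x h
    rcases ih (pvMaxStep o c) x h with h' | h'
    · cases o with
      | none =>
        simp only [pvMaxStep, Option.some.injEq] at h'
        right; simp [h']
      | some y =>
        simp only [pvMaxStep] at h'
        split at h'
        · right; simp only [Option.some.injEq] at h'; simp [h']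
        · left; exact h'
    · right; exact List.mem_cons_of_mem _ h'

theorem pvMin_const (l : List Int) : ∀ a, (∀ y ∈ l, a ≤ y) → pvMin (some a) l = some a := by
  induction l with
  | nil => intro a _; rfl
  | cons c t ih =>
    intro a h
    have hc : ¬ c < a := by have := h c (by simp); omega
    simp only [pvMin, List.foldl_cons, pvMinStep, if_neg hc]
    exact ih a (fun y hy => h y (List.mem_cons_of_mem _ hy))

theorem pvMax_const (l : List Int) : ∀ a, (∀ y ∈ l, y ≤ a) → pvMax (some a) l = some a := by
  induction l with
  | nil => intro a _; rfl
  | cons c t ih =>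
    intro a h
    have hc : ¬ a < c := by have := h c (by simp); omega
    simp only [pvMax, List.foldl_cons, pvMaxStep, if_neg hc]
    exact ih a (fun y hy => h y (List.mem_cons_of_mem _ hy))

theorem pvMin_sorted (l : List Int) (h : l.Pairwise (· ≤ ·)) : pvMin none l = l.head? := by
  cases l with
  | nil => rfl
  | cons a t =>
    simp only [pvMin, List.foldl_cons, pvMinStep, List.head?_cons]
    exact pvMin_const t a (fun y hy => List.rel_of_pairwise_cons h hy)

theorem pvMax_revsorted (l : List Int) (h : l.Pairwise (fun a b => b ≤ a)) :
    pvMax none l = l.head? := by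
  cases l with
  | nil => rfl
  | cons a t =>
    simp only [pvMax, List.foldl_cons, pvMaxStep, List.head?_cons]
    exact pvMax_const t a (fun y hy => List.rel_of_pairwise_cons h hy)

theorem pvMinStep_comm (o : Option Int) (a b : Int) :
    pvMinStep (pvMinStep o a) b = pvMinStep (pvMinStep o b) a := by
  cases o with
  | none =>
    simp only [pvMinStep]
    split_ifs <;> first | rfl | (exfalso; omega) | (simp only [Option.some.injEq]; omega)
  | some x =>
    simp only [pvMinStep]
    split_ifs <;> simp only [pvMinStep] <;> split_ifs <;>
      first | rfl | (exfalso; omega) | (simp only [Option.some.injEq]; omega)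

theorem pvMaxStep_comm (o : Option Int) (a b : Int) :
    pvMaxStep (pvMaxStep o a) b = pvMaxStep (pvMaxStep o b) a := by
  cases o with
  | none =>
    simp only [pvMaxStep]
    split_ifs <;> first | rfl | (exfalso; omega) | (simp only [Option.some.injEq]; omega)
  | some x =>
    simp only [pvMaxStep]
    split_ifs <;> simp only [pvMaxStep] <;> split_ifs <;>
      first | rfl | (exfalso; omega) | (simp only [Option.some.injEq]; omega)

theorem pvMin_perm {l₁ l₂ : List Int} (h : l₁.Perm l₂) : ∀ o, pvMin o l₁ = pvMin o l₂ := by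
  induction h with
  | nil => intro o; rfl
  | cons x _ ih => intro o; simp only [pvMin, List.foldl_cons] at *; exact ih _
  | swap x y l => intro o; simp only [pvMin, List.foldl_cons, pvMinStep_comm]
  | trans _ _ ih₁ ih₂ => intro o; exact (ih₁ o).trans (ih₂ o)

theorem pvMax_perm {l₁ l₂ : List Int} (h : l₁.Perm l₂) : ∀ o, pvMax o l₁ = pvMax o l₂ := by
  induction h with
  | nil => intro o; rfl
  | cons x _ ih => intro o; simp only [pvMax, List.foldl_cons] at *; exact ih _
  | swap x y l => intro o; simp only [pvMax, List.foldl_cons, pvMaxStep_comm]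
  | trans _ _ ih₁ ih₂ => intro o; exact (ih₁ o).trans (ih₂ o)

theorem faAbove_char (m : Int) (d : PySem.Dict Int String) (l : List Int) :
    faAbove m d l = ((l.filter (pvP m d)).head?).bind d.get? := by
  induction l with
  | nil => rfl
  | cons c t ih =>
    by_cases h : m < c ∧ (d.get? c).isSome
    · have hP : pvP m d c = true := by simp [pvP, h.1, h.2]
      cases hv : d.get? c with
      | none => simp [hv] at h
      | some v => simp [faAbove, h, hP, hv]
    · have hP : pvP m d c = false := by
        simp only [pvP, Bool.and_eq_false_iff]
        by_cases h1 : m < c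
        · right; rcases Classical.not_and_iff_not_or_not.mp h with h' | h'
          · exact absurd h1 h'
          · simp [h']
        · left; simp [h1]
      simp [faAbove, h, hP, ih]

theorem faBelow_char (m : Int) (d : PySem.Dict Int String) (l : List Int) :
    faBelow m d l = ((l.filter (pvQ m d)).head?).bind d.get? := by
  induction l with
  | nil => rfl
  | cons c t ih =>
    by_cases h : c < m ∧ (d.get? c).isSome
    · have hQ : pvQ m d c = true := by simp [pvQ, h.1, h.2]
      cases hv : d.get? c with
      | none => simp [hv] at h
      | some v => simp [faBelow, h, hQ, hv]
    · have hQ : pvQ m d c = false := by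
        simp only [pvQ, Bool.and_eq_false_iff]
        by_cases h1 : c < m
        · right; rcases Classical.not_and_iff_not_or_not.mp h with h' | h'
          · exact absurd h1 h'
          · simp [h']
        · left; simp [h1]
      simp [faBelow, h, hQ, ih]

-- ===== VERDICT (by name: the statement is the Claim_ definition above) =====
theorem find_nearest_existing_href_spec : Claim_equal_find_nearest_existing_href := by
  intro m cm ac _
  unfold Spec_find_nearest_existing_href
  simp only [find_nearest_existing_href, find_nearest_existing_href_alt]
  set d := PySem.Dict.ofList cm with hd
  set sc := PySem.List.sorted ac (fun x => x) false with hsc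
  have hperm : sc.Perm ac := PySem.List.sorted_perm ac (fun x => x) false
  have hpw : sc.Pairwise (· ≤ ·) := by
    have := PySem.List.sorted_pairwise (xs := ac) (key := fun x => x)
    simpa using this
  -- above side
  have habove : faAbove m d sc = (pvMin none (ac.filter (pvP m d))).bind d.get? := by
    rw [faAbove_char]
    rw [← pvMin_sorted _ (List.Pairwise.filter _ hpw)]
    rw [pvMin_perm (hperm.filter _)]
  -- below side
  have hpwrev : sc.reverse.Pairwise (fun a b => b ≤ a) := by
    simpa [List.pairwise_reverse] using hpw
  have hbelow : faBelow m d sc.reverse = (pvMax none (ac.filter (pvQ m d))).bind d.get? := by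
    rw [faBelow_char]
    rw [← pvMax_revsorted _ (List.Pairwise.filter _ hpwrev)]
    rw [pvMax_perm (((sc.reverse_perm).trans hperm).filter _)]
  have hfold := fb_fold m d ac none none
  rw [hfold, habove, hbelow]
  cases hA : pvMin none (ac.filter (pvP m d)) with
  | some a =>
    have ha : pvP m d a = true := by
      rcases pvMin_mem _ _ _ hA with h | h
      · exact absurd h (by simp)
      · exact (List.mem_filter.mp h).2
    have : (d.get? a).isSome := by
      have := ha; simp [pvP] at this; exact this.2
    cases hv : d.get? a with
    | none => simp [hv] at this
    | some v => simp [hv]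
  | none =>
    simp only [Option.bind_none]
    cases hB : pvMax none (ac.filter (pvQ m d)) with
    | some b =>
      have hb : pvQ m d b = true := by
        rcases pvMax_mem _ _ _ hB with h | h
        · exact absurd h (by simp)
        · exact (List.mem_filter.mp h).2
      have : (d.get? b).isSome := by
        have := hb; simp [pvQ] at this; exact this.2
      cases hv : d.get? b with
      | none => simp [hv] at this
      | some v => simp [hv]
    | none => simp
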